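-- pv_equiv track=rewrite | github.com/MundVetter/Progathon | 3/3-3.py | calculate_renovations
-- ===== SOURCE A (Python) =====
-- from collections import defaultdict
--
-- def calculate_renovations(original_counts, new_counts):
--     # Calculate histograms of original and new connection counts
--     original_histogram = defaultdict(int)
--     new_histogram = defaultdict(int)
--
--     for count in original_counts.values():
--         original_histogram[count] += 1
--     for count in new_counts.values():
--         new_histogram[count] += 1
--
--     # Calculate the number of renovations based on the histogram differences
--     renovations = 0
--     for count in set(original_histogram.keys()).union(new_histogram.keys()):
--         renovations += abs(original_histogram[count] - new_histogram[count])
--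
--     return renovations // 2
-- ===== SOURCE B (Python) =====
-- def calculate_renovations(original_counts, new_counts):
--     # Two-pointer walk over the two sorted value lists: count unmatched elements
--     # (the symmetric difference of the two value multisets), then halve.
--     a = sorted(original_counts.values())
--     b = sorted(new_counts.values())
--     i = j = mismatch = 0
--     while i < len(a) and j < len(b):
--         if a[i] == b[j]:
--             i += 1
--             j += 1
--         elif a[i] < b[j]:
--             mismatch += 1
--             i += 1
--         else:
--             mismatch += 1
--             j += 1
--     mismatch += (len(a) - i) + (len(b) - j)
--     return mismatch // 2
-- ===== Notes on version B (the rewrite author's own statement) =====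
-- stated objective: alternative
-- what changed: Replaces the two defaultdict histograms and the sum of absolute bin differences over the union of keys by sorting both value lists and counting unmatched elements in a single two-pointer merge walk (the symmetric-difference size of the two value multisets), halved.
import Mathlib
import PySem

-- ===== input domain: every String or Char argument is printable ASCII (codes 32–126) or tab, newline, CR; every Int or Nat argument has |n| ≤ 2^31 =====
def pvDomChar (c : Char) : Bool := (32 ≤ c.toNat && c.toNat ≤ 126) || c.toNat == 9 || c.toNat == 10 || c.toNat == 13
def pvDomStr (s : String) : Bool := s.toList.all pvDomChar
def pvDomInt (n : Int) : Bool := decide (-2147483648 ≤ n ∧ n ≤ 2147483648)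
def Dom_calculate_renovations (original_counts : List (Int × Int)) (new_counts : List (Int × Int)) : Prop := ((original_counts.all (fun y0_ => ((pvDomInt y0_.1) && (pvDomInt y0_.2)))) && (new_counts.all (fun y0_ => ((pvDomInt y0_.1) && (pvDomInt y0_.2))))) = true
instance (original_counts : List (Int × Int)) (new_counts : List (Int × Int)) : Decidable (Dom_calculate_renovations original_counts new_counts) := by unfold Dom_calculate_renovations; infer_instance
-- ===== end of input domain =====

-- B counts the symmetric difference of the two value multisets by one two-pointer
-- walk over the two sorted value lists, instead of A's histogram difference sum;
-- objective: alternative algorithm (not claimed faster).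

-- ===== PORT A =====
def calculate_renovations (original_counts : List (Int × Int)) (new_counts : List (Int × Int)) : Int :=
  let original_histogram :=
    ((PySem.Dict.ofList original_counts).values).foldl
      (fun d count => d.modify count 0 (· + 1)) PySem.Dict.empty
  let new_histogram :=
    ((PySem.Dict.ofList new_counts).values).foldl
      (fun d count => d.modify count 0 (· + 1)) PySem.Dict.empty
  let renovations :=
    (PySem.Set.union (PySem.Set.ofList original_histogram.keys) new_histogram.keys).foldl
      (fun acc count => acc + |original_histogram.getD count 0 - new_histogram.getD count 0|) 0
  PySem.Int.floordiv renovations 2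

-- ===== PORT B =====
-- the two-pointer while loop of Source B, as recursion on the two remaining suffixes
def mismatchMerge : List Int → List Int → Int
  | [], b => b.length
  | x :: xs, [] => (x :: xs).length
  | x :: xs, y :: ys =>
    if x = y then mismatchMerge xs ys
    else if x < y then 1 + mismatchMerge xs (y :: ys)
    else 1 + mismatchMerge (x :: xs) ys
termination_by a b => a.length + b.length

def calculate_renovations_alt (original_counts : List (Int × Int)) (new_counts : List (Int × Int)) : Int :=
  let a := PySem.List.sorted ((PySem.Dict.ofList original_counts).values) (fun x => x) false
  let b := PySem.List.sorted ((PySem.Dict.ofList new_counts).values) (fun x => x) false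
  PySem.Int.floordiv (mismatchMerge a b) 2

-- ===== PRECONDITION & SPEC =====
def Spec_calculate_renovations (original_counts : List (Int × Int)) (new_counts : List (Int × Int)) (out : Int) : Prop := out = calculate_renovations_alt original_counts new_counts
instance (original_counts : List (Int × Int)) (new_counts : List (Int × Int)) (out : Int) : Decidable (Spec_calculate_renovations original_counts new_counts out) := by unfold Spec_calculate_renovations; infer_instance

-- ===== CLAIM (what is proved, stated in full; the proofs are below) =====
def Claim_equal_calculate_renovations : Prop := ∀ (original_counts : List (Int × Int)) (new_counts : List (Int × Int)), Dom_calculate_renovations original_counts new_counts → Spec_calculate_renovations original_counts new_counts (calculate_renovations original_counts new_counts)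

-- ===== LEMMAS AND PROOFS =====

-- size of the symmetric difference of two multisets: the common value both ports compute
def pvSD (s t : Multiset Int) : ℕ := Multiset.card (s - t) + Multiset.card (t - s)

theorem pvSD_comm (s t : Multiset Int) : pvSD s t = pvSD t s := by
  simp [pvSD, Nat.add_comm]

theorem pvSD_nil_left (b : List Int) : pvSD 0 (b : Multiset Int) = b.length := by
  simp [pvSD, tsub_eq_zero_of_le (Multiset.zero_le _)]

theorem pv_cons_sub_of_not_mem (x : Int) (s t : Multiset Int) (h : x ∉ t) :
    (x ::ₘ s) - t = x ::ₘ (s - t) := by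
  ext c
  by_cases hc : c = x <;>
    simp [Multiset.count_sub, hc, Multiset.count_eq_zero.mpr h]

theorem pvSD_cons_left (x : Int) (s t : Multiset Int) (h : x ∉ t) :
    pvSD (x ::ₘ s) t = 1 + pvSD s t := by
  have h1 : (x ::ₘ s) - t = x ::ₘ (s - t) := pv_cons_sub_of_not_mem x s t h
  have h2 : t - (x ::ₘ s) = t - s := by
    rw [Multiset.sub_cons, Multiset.erase_of_notMem h]
  simp [pvSD, h1, h2]; omega

theorem pvSD_cons_cons (x : Int) (s t : Multiset Int) :
    pvSD (x ::ₘ s) (x ::ₘ t) = pvSD s t := by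
  simp [pvSD, Multiset.sub_cons, Multiset.erase_cons_head]

theorem pv_abs_sub_cast (m n : ℕ) : |(m : ℤ) - n| = (((m - n) + (n - m) : ℕ) : ℤ) := by
  rcases le_total m n with h | h
  · rw [abs_of_nonpos (by exact_mod_cast sub_nonpos.mpr (Int.ofNat_le.mpr h))]; omega
  · rw [abs_of_nonneg (by exact_mod_cast sub_nonneg.mpr (Int.ofNat_le.mpr h))]; omega

-- B-side: on sorted lists the merge walk counts the symmetric difference
theorem mismatchMerge_eq_pvSD : ∀ (k : ℕ) (a b : List Int), a.length + b.length ≤ k →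
    a.Pairwise (· ≤ ·) → b.Pairwise (· ≤ ·) →
    mismatchMerge a b = ((pvSD (a : Multiset Int) (b : Multiset Int) : ℕ) : ℤ) := by
  intro k
  induction k with
  | zero =>
    intro a b hlen _ _
    have ha : a = [] := by cases a <;> simp_all
    have hb : b = [] := by cases b <;> simp_all
    subst ha; subst hb
    simp [mismatchMerge, pvSD]
  | succ k ih =>
    intro a b hlen hsa hsb
    match a, b with
    | [], b => simp [mismatchMerge, pvSD_nil_left]
    | x :: xs, [] =>
      rw [mismatchMerge, pvSD_comm, Multiset.coe_nil, pvSD_nil_left]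
    | x :: xs, y :: ys =>
      rw [mismatchMerge]
      rcases List.pairwise_cons.mp hsa with ⟨hxle, hsa'⟩
      rcases List.pairwise_cons.mp hsb with ⟨hyle, hsb'⟩
      simp only [List.length_cons] at hlen
      by_cases hxy : x = y
      · rw [if_pos hxy, ih xs ys (by omega) hsa' hsb']
        subst hxy
        simp only [← Multiset.cons_coe]
        rw [pvSD_cons_cons]
      · rw [if_neg hxy]
        by_cases hlt : x < y
        · rw [if_pos hlt, ih xs (y :: ys) (by simp only [List.length_cons]; omega) hsa' hsb]
          have hnm : x ∉ (y ::ₘ (↑ys : Multiset Int)) := by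
            intro hmem
            rcases (by simpa using hmem : x = y ∨ x ∈ ys) with h | h
            · exact hxy h
            · exact absurd (hyle x h) (not_le.mpr hlt)
          simp only [← Multiset.cons_coe]
          rw [pvSD_cons_left x _ _ hnm]
          push_cast; ring
        · rw [if_neg hlt, ih (x :: xs) ys (by simp only [List.length_cons]; omega) hsa hsb']
          have hgt : y < x := lt_of_le_of_ne (not_lt.mp hlt) (Ne.symm hxy)
          have hnm : y ∉ (x ::ₘ (↑xs : Multiset Int)) := by
            intro hmem
            rcases (by simpa using hmem : y = x ∨ y ∈ xs) with h | h
            · exact hxy h.symm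
            · exact absurd (hxle y h) (not_le.mpr hgt)
          simp only [← Multiset.cons_coe]
          rw [pvSD_comm (x ::ₘ (↑xs : Multiset Int)) (y ::ₘ ↑ys), pvSD_cons_left y _ _ hnm,
              pvSD_comm ((↑ys : Multiset Int))]
          push_cast; ring

-- A-side: the sum of absolute histogram differences over the key union is the same number
theorem counter_sum_eq_pvSD (O N : List Int) :
    (PySem.Set.union (PySem.Set.ofList (PySem.Dict.counter O).keys) (PySem.Dict.counter N).keys).foldl
      (fun acc c => acc + |(PySem.Dict.counter O).getD c 0 - (PySem.Dict.counter N).getD c 0|) 0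
    = ((pvSD (O : Multiset Int) (N : Multiset Int) : ℕ) : ℤ) := by
  have hk : (PySem.Set.union (PySem.Set.ofList (PySem.Dict.counter O).keys) (PySem.Dict.counter N).keys)
      = PySem.Set.union (PySem.Set.ofList O) (PySem.Set.ofList N) := by
    simp [PySem.Dict.keys_counter, PySem.Set.ofList_ofList]
  rw [hk]
  set u := PySem.Set.union (PySem.Set.ofList O) (PySem.Set.ofList N) with hu
  have hnd : u.Nodup := by simp [hu, pysem]
  have hmem : ∀ x : Int, x ∈ u ↔ x ∈ O ∨ x ∈ N := by intro x; simp [hu, pysem]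
  set S : Multiset Int := ((O : Multiset Int) - N) + ((N : Multiset Int) - O) with hS
  have hpt : ∀ c : Int,
      |(PySem.Dict.counter O).getD c 0 - (PySem.Dict.counter N).getD c 0|
        = ((Multiset.count c S : ℕ) : ℤ) := by
    intro c
    rw [PySem.Dict.getD_counter, PySem.Dict.getD_counter]
    have : Multiset.count c S = (O.count c - N.count c) + (N.count c - O.count c) := by
      rw [hS, Multiset.count_add, Multiset.count_sub, Multiset.count_sub]
      simp only [Multiset.coe_count]
    rw [this, pv_abs_sub_cast]
  calc u.foldl (fun acc c => acc + |(PySem.Dict.counter O).getD c 0 - (PySem.Dict.counter N).getD c 0|) 0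
      = 0 + (u.map (fun c => |(PySem.Dict.counter O).getD c 0 - (PySem.Dict.counter N).getD c 0|)).sum :=
        PySem.List.foldl_add u _ 0
    _ = u.toFinset.sum (fun c => |(PySem.Dict.counter O).getD c 0 - (PySem.Dict.counter N).getD c 0|) := by
        rw [List.sum_toFinset _ hnd, zero_add]
    _ = u.toFinset.sum (fun c => ((Multiset.count c S : ℕ) : ℤ)) := by
        exact Finset.sum_congr rfl (fun c _ => hpt c)
    _ = ((u.toFinset.sum (fun c => Multiset.count c S) : ℕ) : ℤ) := by push_cast; rfl
    _ = ((pvSD (O : Multiset Int) (N : Multiset Int) : ℕ) : ℤ) := by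
        congr 1
        have hsub : S.toFinset ⊆ u.toFinset := by
          intro x hx
          rw [Multiset.mem_toFinset] at hx
          rw [List.mem_toFinset, hmem]
          rcases Multiset.mem_add.mp (hS ▸ hx) with h | h
          · exact Or.inl (by simpa only [Multiset.mem_coe] using
              Multiset.mem_of_le (Multiset.sub_le_self _ _) h)
          · exact Or.inr (by simpa only [Multiset.mem_coe] using
              Multiset.mem_of_le (Multiset.sub_le_self _ _) h)
        have hcard : pvSD (O : Multiset Int) (N : Multiset Int) = Multiset.card S := by
          simp only [pvSD, hS, Multiset.card_add]
        rw [hcard, ← Multiset.toFinset_sum_count_eq S]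
        exact (Finset.sum_subset hsub (fun x _ hx =>
          Multiset.count_eq_zero.mpr (fun hm => hx (Multiset.mem_toFinset.mpr hm)))).symm

-- ===== VERDICT (by name: the statement is the Claim_ definition above) =====
theorem calculate_renovations_spec : Claim_equal_calculate_renovations := by
  intro original_counts new_counts _
  unfold Spec_calculate_renovations calculate_renovations calculate_renovations_alt
  rw [← PySem.Dict.counter_eq_foldl, ← PySem.Dict.counter_eq_foldl]
  set O := (PySem.Dict.ofList original_counts).values with hO
  set N := (PySem.Dict.ofList new_counts).values with hN
  show PySem.Int.floordiv
      ((PySem.Set.union (PySem.Set.ofList (PySem.Dict.counter O).keys) (PySem.Dict.counter N).keys).foldl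
        (fun acc count => acc + |(PySem.Dict.counter O).getD count 0 - (PySem.Dict.counter N).getD count 0|) 0) 2
    = PySem.Int.floordiv
        (mismatchMerge (PySem.List.sorted O (fun x => x) false) (PySem.List.sorted N (fun x => x) false)) 2
  rw [counter_sum_eq_pvSD O N]
  congr 1
  have hmm := mismatchMerge_eq_pvSD
      ((PySem.List.sorted O (fun x => x) false).length + (PySem.List.sorted N (fun x => x) false).length)
      (PySem.List.sorted O (fun x => x) false) (PySem.List.sorted N (fun x => x) false) le_rfl
      (PySem.List.sorted_pairwise O (fun x => x))
      (PySem.List.sorted_pairwise N (fun x => x))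
  rw [hmm]
  congr 2
  · exact (Multiset.coe_eq_coe.mpr (PySem.List.sorted_perm O _ _)).symm
  · exact (Multiset.coe_eq_coe.mpr (PySem.List.sorted_perm N _ _)).symm
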